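-- pv_equiv track=rewrite | github.com/Satya900/codeforces | Valentine Gift.py | can_plan_gifts
-- ===== SOURCE A (Python) =====
-- def can_plan_gifts(budget):
--     current_gift_value = 1  # Starting with the minimum value for the first gift
--     remaining_budget = budget
--
--     for _ in range(7):  # Chef wants to plan gifts for 7 days
--         if current_gift_value > remaining_budget:
--             return "NO"
--         remaining_budget -= current_gift_value  # Deducting the cost of the current gift
--         current_gift_value *= 2  # Doubling the value for the next gift
--
--     return "YES"  # If the loop completes without returning NO, then Chef can plan gifts
-- ===== SOURCE B (Python) =====
-- def can_plan_gifts(budget):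
--     # Total cost of 7 doubling gifts is 1+2+4+...+64 = 2**7 - 1 = 127.
--     return "YES" if budget >= 127 else "NO"
-- ===== Notes on version B (the rewrite author's own statement) =====
-- stated objective: simpler
-- what changed: Replaced the 7-iteration doubling loop with a single closed-form comparison budget >= 127 (the total cost 2**7 - 1).
import Mathlib
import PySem

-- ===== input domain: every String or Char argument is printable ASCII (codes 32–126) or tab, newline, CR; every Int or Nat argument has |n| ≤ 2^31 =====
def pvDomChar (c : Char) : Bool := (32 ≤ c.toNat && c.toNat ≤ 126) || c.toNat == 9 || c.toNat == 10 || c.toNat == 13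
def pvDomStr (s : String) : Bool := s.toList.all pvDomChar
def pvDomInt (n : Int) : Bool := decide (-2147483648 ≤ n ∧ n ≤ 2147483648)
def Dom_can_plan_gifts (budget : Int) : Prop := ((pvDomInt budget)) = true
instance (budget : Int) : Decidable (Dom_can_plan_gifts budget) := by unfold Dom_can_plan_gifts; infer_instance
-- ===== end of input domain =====

-- B replaces A's 7-step doubling loop with one closed-form comparison (budget >= 127); simpler, same result.


-- ===== PORT A =====
-- Loop over range(7) with early return, carried as (current_gift_value, remaining_budget).
def can_plan_gifts_loop (n : Nat) (current_gift_value remaining_budget : Int) : String :=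
  match n with
  | 0 => "YES"
  | Nat.succ m =>
    if current_gift_value > remaining_budget then "NO"
    else can_plan_gifts_loop m (current_gift_value * 2) (remaining_budget - current_gift_value)

def can_plan_gifts (budget : Int) : String :=
  can_plan_gifts_loop 7 1 budget

-- ===== PORT B =====
def can_plan_gifts_alt (budget : Int) : String :=
  if budget ≥ 127 then "YES" else "NO"

-- ===== PRECONDITION & SPEC =====
def Spec_can_plan_gifts (budget : Int) (out : String) : Prop := out = can_plan_gifts_alt budget
instance (budget : Int) (out : String) : Decidable (Spec_can_plan_gifts budget out) := by unfold Spec_can_plan_gifts; infer_instance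

-- ===== CLAIM (what is proved, stated in full; the proofs are below) =====
def Claim_equal_can_plan_gifts : Prop := ∀ (budget : Int), Dom_can_plan_gifts budget → Spec_can_plan_gifts budget (can_plan_gifts budget)

-- ===== LEMMAS AND PROOFS =====

-- ===== VERDICT (by name: the statement is the Claim_ definition above) =====
theorem can_plan_gifts_spec : Claim_equal_can_plan_gifts := by
  intro budget _
  unfold Spec_can_plan_gifts can_plan_gifts can_plan_gifts_alt
  simp only [can_plan_gifts_loop]
  split_ifs <;> first | rfl | omega
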